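-- pv_equiv track=rewrite | github.com/VityasZV/Python-tasks | homework-9/BitCoding.py | additional_sort
-- ===== SOURCE A (Python) =====
-- import operator
--
-- def additional_sort(f):
--     i = 0
--     while i < len(f)-1:
--         start = i
--         finish = i
--         for_sort = []
--         while i < len(f)-1 and f[i][1] == f[i+1][1]:
--             i += 1
--             finish = i
--         if start != finish:
--             for_sort = f[start:finish+1]
--             if len(for_sort):
--                 for_replace = sorted(for_sort, key=operator.itemgetter(0), reverse=True)
--                 for ind in range(start, finish+1):
--                     f[ind] = for_replace[ind - start]
--                 i += 1
--         else:
--             i += 1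
--     result = "".join(el[0] for el in f)
--     return result
-- ===== SOURCE B (Python) =====
-- def additional_sort(f):
--     # Assign each element the id of the contiguous run of equal second fields
--     # it belongs to, then reorder the whole list globally with two stable
--     # sorts: by first component descending, then by run id ascending.
--     # (Mutates f in place like the original, via f[:] = ...)
--     rids = []
--     rid = 0
--     prev = None
--     for el in f:
--         if prev is not None and el[1] != prev[1]:
--             rid += 1
--         rids.append(rid)
--         prev = el
--     pairs = sorted(zip(f, rids), key=lambda p: p[0][0], reverse=True)
--     pairs.sort(key=lambda p: p[1])
--     f[:] = [p[0] for p in pairs]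
--     return "".join(el[0] for el in f)
-- ===== Notes on version B (the rewrite author's own statement) =====
-- stated objective: alternative
-- what changed: Replaces the index-based while loop that finds each equal-key run and rewrites that slice of f in place with a single run-id labelling pass followed by two global stable sorts (by first component descending, then stably by run id ascending).
import Mathlib
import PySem

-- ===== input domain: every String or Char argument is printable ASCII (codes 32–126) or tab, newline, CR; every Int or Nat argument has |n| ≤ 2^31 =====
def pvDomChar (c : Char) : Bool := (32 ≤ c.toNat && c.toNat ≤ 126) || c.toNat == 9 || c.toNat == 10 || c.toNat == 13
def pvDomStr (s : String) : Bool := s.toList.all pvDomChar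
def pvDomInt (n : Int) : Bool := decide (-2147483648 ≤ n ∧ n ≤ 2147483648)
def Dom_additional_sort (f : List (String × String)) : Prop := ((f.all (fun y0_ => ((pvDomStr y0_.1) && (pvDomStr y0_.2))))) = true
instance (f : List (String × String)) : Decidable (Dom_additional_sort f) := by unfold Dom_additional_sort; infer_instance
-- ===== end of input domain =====

-- A finds each contiguous equal-second-field run with an index-based while loop and
-- rewrites that slice of f with its reverse-sorted copy; B labels elements with run ids
-- and reorders the whole list with two global stable sorts (by first component
-- descending, then by run id ascending). Equivalence is about the return value; in
-- Python both leave f in the same final state (B via f[:] = ...).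


-- ===== PORT A =====
-- inner while: `while i < len(f)-1 and f[i][1] == f[i+1][1]: i += 1; finish = i`
-- (fuel-bounded; the indices read are always in range, so pyGetD's default is never used)
def asInner (f : List (String × String)) (i finish : Int) (fuel : Nat) : Int × Int :=
  match fuel with
  | 0 => (i, finish)
  | Nat.succ fuel =>
    if i < PySem.List.len f - 1 ∧
        (PySem.List.pyGetD f i ("", "")).2 = (PySem.List.pyGetD f (i + 1) ("", "")).2 then
      asInner f (i + 1) (i + 1) fuel
    else (i, finish)

-- outer while loop of A (fuel-bounded; i grows by ≥ 1 per iteration so len f fuel suffices)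
def asOuter (f : List (String × String)) (i : Int) (fuel : Nat) : List (String × String) :=
  match fuel with
  | 0 => f
  | Nat.succ fuel =>
    if i < PySem.List.len f - 1 then
      let start := i
      let p := asInner f i i f.length
      let i' := p.1
      let finish := p.2
      if start ≠ finish then
        let for_sort := PySem.List.slice f (some start) (some (finish + 1))
        if PySem.List.len for_sort ≠ 0 then
          let for_replace := PySem.List.sorted for_sort (fun el => el.1) true
          let f' := (PySem.List.pyRange start (finish + 1)).foldl
              (fun acc ind =>
                PySem.List.pySetD acc ind (PySem.List.pyGetD for_replace (ind - start) ("", ""))) f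
          asOuter f' (i' + 1) fuel
        else
          asOuter f i' fuel
      else
        asOuter f (i' + 1) fuel
    else f

def additional_sort (f : List (String × String)) : String :=
  let f' := asOuter f 0 f.length
  PySem.Str.join "" (f'.map (fun el => el.1))

-- ===== PORT B =====
-- run-id labelling pass: state (rids, rid, prev)
def bRids (f : List (String × String)) : List Int :=
  (f.foldl
    (fun (st : List Int × Int × Option (String × String)) el =>
      let rid := match st.2.2 with
        | some prev => if el.2 ≠ prev.2 then st.2.1 + 1 else st.2.1
        | none => st.2.1
      (st.1 ++ [rid], rid, some el))
    ([], 0, none)).1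

def additional_sort_alt (f : List (String × String)) : String :=
  let rids := bRids f
  let pairs := PySem.List.sorted (f.zip rids) (fun p => p.1.1) true
  let pairs2 := PySem.List.sorted pairs (fun p => p.2) false
  let f2 := pairs2.map (fun p => p.1)
  PySem.Str.join "" (f2.map (fun el => el.1))

-- ===== PRECONDITION & SPEC =====
def Spec_additional_sort (f : List (String × String)) (out : String) : Prop := out = additional_sort_alt f
instance (f : List (String × String)) (out : String) : Decidable (Spec_additional_sort f out) := by unfold Spec_additional_sort; infer_instance

-- ===== CLAIM (what is proved, stated in full; the proofs are below) =====
def Claim_equal_additional_sort : Prop := ∀ (f : List (String × String)), Dom_additional_sort f → Spec_additional_sort f (additional_sort f)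

-- ===== LEMMAS AND PROOFS =====

-- the contiguous equal-second-field runs of f
def pvRuns : List (String × String) → List (List (String × String))
  | [] => []
  | x :: xs =>
      (x :: xs.takeWhile (fun y => y.2 == x.2)) :: pvRuns (xs.dropWhile (fun y => y.2 == x.2))
  termination_by f => f.length
  decreasing_by simp; exact List.length_dropWhile_le _ _

-- the common value of both programs (per-run reverse sort, concatenated)
def pvProc (f : List (String × String)) : List (String × String) :=
  (pvRuns f).flatMap (fun r => PySem.List.sorted r (fun el => el.1) true)

-- run-id tagging
def pvTag (j : Int) : List (String × String) → List ((String × String) × Int)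
  | [] => []
  | x :: xs =>
      ((x :: xs.takeWhile (fun y => y.2 == x.2)).map (fun el => (el, j)))
        ++ pvTag (j + 1) (xs.dropWhile (fun y => y.2 == x.2))
  termination_by f => f.length
  decreasing_by simp; exact List.length_dropWhile_le _ _

-- recursion form of B's labelling loop
def pvRidsAux (prev : Option String) (j : Int) : List (String × String) → List Int
  | [] => []
  | el :: f =>
      let j' := match prev with
        | some p => if el.2 ≠ p then j + 1 else j
        | none => j
      j' :: pvRidsAux (some el.2) j' f

def pvIota (j0 : Int) : Nat → List Int
  | 0 => []
  | Nat.succ n => j0 :: pvIota (j0 + 1) n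

-- ---------- B-side lemmas ----------

theorem pv_bRids_foldl (f : List (String × String)) (acc : List Int) (j : Int)
    (prev : Option (String × String)) :
    (f.foldl
      (fun (st : List Int × Int × Option (String × String)) el =>
        let rid := match st.2.2 with
          | some prev => if el.2 ≠ prev.2 then st.2.1 + 1 else st.2.1
          | none => st.2.1
        (st.1 ++ [rid], rid, some el))
      (acc, j, prev)).1 = acc ++ pvRidsAux (prev.map (fun p => p.2)) j f := by
  induction f generalizing acc j prev with
  | nil => simp [pvRidsAux]
  | cons el f ih =>
    cases prev with
    | none =>
      simp only [List.foldl_cons]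
      rw [ih]
      simp [pvRidsAux]
    | some q =>
      simp only [List.foldl_cons]
      rw [ih]
      by_cases h : el.2 = q.2
      · simp [pvRidsAux, h]
      · simp [pvRidsAux, h]
--ENDPROOF


theorem pv_zip_ridsAux_cont (f : List (String × String)) (j : Int) (c : String) :
    f.zip (pvRidsAux (some c) j f)
      = (f.takeWhile (fun y => y.2 == c)).map (fun el => (el, j))
        ++ pvTag (j + 1) (f.dropWhile (fun y => y.2 == c)) := by
  induction f generalizing j c with
  | nil => simp [pvRidsAux, pvTag]
  | cons y ys ih =>
    by_cases h : y.2 = c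
    · simp only [pvRidsAux, h, ne_eq, not_true_eq_false, if_false, List.zip_cons_cons,
        List.takeWhile_cons, List.dropWhile_cons, beq_self_eq_true, if_true, List.map_cons]
      rw [ih]
      simp
    · simp only [pvRidsAux, h, ne_eq, not_false_eq_true, if_true, List.zip_cons_cons,
        List.takeWhile_cons, List.dropWhile_cons]
      have hb : (y.2 == c) = false := by simpa using h
      simp only [hb, if_false, Bool.false_eq_true, List.map_nil, List.nil_append, pvTag]
      rw [ih (j + 1) y.2]
      simp [add_assoc]


theorem pv_zip_rids (f : List (String × String)) :
    f.zip (pvRidsAux none 0 f) = pvTag 0 f := by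
  cases f with
  | nil => simp [pvRidsAux, pvTag]
  | cons x xs =>
    simp only [pvRidsAux, List.zip_cons_cons]
    rw [pv_zip_ridsAux_cont]
    simp [pvTag]

theorem pv_tag_bounds (f : List (String × String)) (j : Int)
    (p : (String × String) × Int) (hp : p ∈ pvTag j f) :
    j ≤ p.2 ∧ p.2 < j + (pvRuns f).length := by
  revert hp
  induction j, f using pvTag.induct generalizing p with
  | case1 j => intro hp; simp [pvTag] at hp
  | case2 j x xs ih =>
    intro hp
    have hlen : (pvRuns (x :: xs)).length
        = (pvRuns (xs.dropWhile (fun y => y.2 == x.2))).length + 1 := by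
      rw [pvRuns]; simp
    rw [pvTag] at hp
    rcases List.mem_append.mp hp with hl | hr
    · rcases List.mem_map.mp hl with ⟨el, _, hel⟩
      have : p.2 = j := by rw [← hel]
      rw [hlen]; omega
    · have := ih p hr
      rw [hlen]
      omega

theorem pv_mem_iota (j0 x : Int) (n : Nat) :
    x ∈ pvIota j0 n ↔ j0 ≤ x ∧ x < j0 + n := by
  induction n generalizing j0 with
  | zero => simp [pvIota]
  | succ n ih =>
    simp only [pvIota, List.mem_cons, ih (j0 + 1)]
    omega

theorem pv_iota_pairwise (j0 : Int) (n : Nat) : (pvIota j0 n).Pairwise (· < ·) := by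
  induction n generalizing j0 with
  | zero => simp [pvIota]
  | succ n ih =>
    simp only [pvIota, List.pairwise_cons]
    exact ⟨fun x hx => ((pv_mem_iota _ _ _).mp hx).1.trans_lt' (by omega), ih (j0 + 1)⟩

theorem pv_insertBy_front {α : Type} (before : α → α → Bool) (z : α) (t : List α)
    (h : ∀ y ∈ t, before z y = true) :
    PySem.List.insertBy before z t = z :: t := by
  cases t with
  | nil => simp [PySem.List.insertBy]
  | cons y ys => simp [PySem.List.insertBy, h y (by simp)]

theorem pv_insertBy_append {α : Type} (before : α → α → Bool) (z : α) (l t : List α)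
    (h : ∀ y ∈ l, before z y = false) :
    PySem.List.insertBy before z (l ++ t) = l ++ PySem.List.insertBy before z t := by
  induction l with
  | nil => simp
  | cons a l ih =>
    have ha := h a (by simp)
    simp only [List.cons_append, PySem.List.insertBy, ha, Bool.false_eq_true, if_false]
    rw [ih fun y hy => h y (by simp [hy])]

theorem pv_insertBy_groups {α : Type} (js : List Int) (G : Int → List (α × Int))
    (z : α × Int)
    (hj : js.Pairwise (· < ·))
    (hg : ∀ j ∈ js, ∀ p ∈ G j, p.2 = j)
    (hz : z.2 ∈ js) :
    PySem.List.insertBy (fun a b => decide (a.2 < b.2)) z (js.flatMap G)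
      = js.flatMap (fun j => G j ++ if z.2 = j then [z] else []) := by
  induction js with
  | nil => simp at hz
  | cons j js ih =>
    rw [List.pairwise_cons] at hj
    have hgj : ∀ p ∈ G j, p.2 = j := hg j (by simp)
    simp only [List.flatMap_cons]
    by_cases hzj : z.2 = j
    · have hskip : ∀ y ∈ G j, (fun a b => decide (a.2 < b.2)) z y = false := by
        intro y hy
        simp [hgj y hy, hzj]
      rw [pv_insertBy_append _ _ _ _ hskip]
      have hfront : ∀ y ∈ js.flatMap G, (fun a b => decide (a.2 < b.2)) z y = true := by
        intro y hy
        rcases List.mem_flatMap.mp hy with ⟨j', hj', hyj'⟩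
        have := hg j' (by simp [hj']) y hyj'
        have hlt := hj.1 j' hj'
        simp [this, hzj]
        omega
      rw [pv_insertBy_front _ _ _ hfront]
      have hcongr : js.flatMap (fun j' => G j' ++ if z.2 = j' then [z] else [])
          = js.flatMap G := by
        apply List.flatMap_congr
        intro a ha
        have : z.2 ≠ a := by have := hj.1 a ha; omega
        simp [this]
      rw [hcongr, if_pos hzj]
      simp
    · have hz' : z.2 ∈ js := by
        rcases List.mem_cons.mp hz with h | h
        · exact absurd h hzj
        · exact h
      have hskip : ∀ y ∈ G j, (fun a b => decide (a.2 < b.2)) z y = false := by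
        intro y hy
        have hyj := hgj y hy
        have hlt := hj.1 z.2 hz'
        simp [hyj]
        omega
      rw [pv_insertBy_append _ _ _ _ hskip]
      rw [ih hj.2 (fun j' hj' => hg j' (by simp [hj'])) hz']
      rw [if_neg hzj]
      simp

theorem pv_sorted_groups {α : Type} (zs : List (α × Int)) (js : List Int)
    (hj : js.Pairwise (· < ·))
    (hm : ∀ p ∈ zs, p.2 ∈ js) :
    PySem.List.sorted zs (fun p => p.2) false
      = js.flatMap (fun j => zs.filter (fun p => p.2 == j)) := by
  induction zs using List.reverseRecOn with
  | nil => simp [PySem.List.sorted]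
  | append_singleton ys z ih =>
    rw [PySem.List.sorted_eq_foldl_insertBy, List.foldl_append, List.foldl_cons, List.foldl_nil,
      ← PySem.List.sorted_eq_foldl_insertBy]
    rw [ih (fun p hp => hm p (by simp [hp]))]
    rw [pv_insertBy_groups js (fun j => ys.filter (fun p => p.2 == j)) z hj
      (fun j hj' p hp => by simpa using (List.mem_filter.mp hp).2) (hm z (by simp))]
    apply List.flatMap_congr
    intro a _
    by_cases hza : z.2 = a
    · simp [List.filter_append, hza]
    · simp [List.filter_append, hza]

theorem pv_filter_insertBy {α : Type} {κ : Type} [LinearOrder κ] (key : α → κ)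
    (p : α → Bool) (z : α) (acc : List α)
    (hs : acc.Pairwise (fun a b => key b ≤ key a)) :
    (PySem.List.insertBy (fun a b => decide (key b < key a)) z acc).filter p
      = if p z then PySem.List.insertBy (fun a b => decide (key b < key a)) z (acc.filter p)
        else acc.filter p := by
  induction acc with
  | nil => cases hpz : p z <;> simp [PySem.List.insertBy, hpz]
  | cons a as ih =>
    rw [List.pairwise_cons] at hs
    by_cases hba : key a < key z
    · have hb : decide (key a < key z) = true := by simp [hba]
      simp only [PySem.List.insertBy, hb, if_true]
      cases hpz : p z with
      | true =>
        have hfront : ∀ y ∈ (a :: as).filter p,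
            (fun a b => decide (key b < key a)) z y = true := by
          intro y hy
          have hy' := List.mem_of_mem_filter hy
          rcases List.mem_cons.mp hy' with h | h
          · subst h; simp [hba]
          · have := hs.1 y h
            simp
            exact lt_of_le_of_lt this hba
        rw [pv_insertBy_front _ _ _ hfront]
        simp [hpz]
      | false => simp [hpz]
    · have hb : decide (key a < key z) = false := by simp [hba]
      simp only [PySem.List.insertBy, hb, Bool.false_eq_true, if_false]
      cases hpz : p z with
      | true =>
        cases hpa : p a with
        | true =>
          simp only [List.filter_cons, hpa, if_true]
          rw [ih hs.2, if_pos hpz]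
          simp only [PySem.List.insertBy, hb, Bool.false_eq_true, if_false]
        | false =>
          simp only [List.filter_cons, hpa, Bool.false_eq_true, if_false]
          rw [ih hs.2, if_pos hpz]
          simp
      | false =>
        simp only [List.filter_cons]
        rw [ih hs.2]
        simp [hpz]

theorem pv_filter_sorted_rev {α : Type} {κ : Type} [LinearOrder κ] (key : α → κ)
    (p : α → Bool) (xs : List α) :
    (PySem.List.sorted xs key true).filter p = PySem.List.sorted (xs.filter p) key true := by
  induction xs using List.reverseRecOn with
  | nil => simp [PySem.List.sorted]
  | append_singleton ys z ih =>
    rw [PySem.List.sorted_rev_eq_foldl_insertBy, List.foldl_append, List.foldl_cons,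
      List.foldl_nil, ← PySem.List.sorted_rev_eq_foldl_insertBy]
    rw [pv_filter_insertBy key p z _ (PySem.List.sorted_pairwise_rev ys key), ih,
      List.filter_append]
    cases hpz : p z with
    | true =>
      rw [if_pos rfl]
      rw [PySem.List.sorted_rev_eq_foldl_insertBy (ys.filter p ++ [z].filter p), List.foldl_append]
      simp only [List.filter_cons, hpz, if_true, List.filter_nil, List.foldl_cons, List.foldl_nil]
      rw [← PySem.List.sorted_rev_eq_foldl_insertBy]
    | false =>
      rw [if_neg (by simp)]
      simp [hpz]

theorem pv_insertBy_map {α β : Type} (g : α → β) (bf : α → α → Bool) (bf' : β → β → Bool)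
    (hcomp : ∀ a b, bf' (g a) (g b) = bf a b) (x : α) (acc : List α) :
    PySem.List.insertBy bf' (g x) (acc.map g) = (PySem.List.insertBy bf x acc).map g := by
  induction acc with
  | nil => simp [PySem.List.insertBy]
  | cons a as ih =>
    simp only [List.map_cons, PySem.List.insertBy, hcomp x a]
    cases hb : bf x a <;> simp [ih]

theorem pv_foldl_insertBy_map {α β : Type} (g : α → β) (bf : α → α → Bool) (bf' : β → β → Bool)
    (hcomp : ∀ a b, bf' (g a) (g b) = bf a b) (r : List α) : ∀ acc : List α,
    (r.map g).foldl (fun acc x => PySem.List.insertBy bf' x acc) (acc.map g)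
      = (r.foldl (fun acc x => PySem.List.insertBy bf x acc) acc).map g := by
  induction r with
  | nil => intro acc; simp
  | cons a as ih =>
    intro acc
    simp only [List.map_cons, List.foldl_cons]
    rw [pv_insertBy_map g bf bf' hcomp a acc, ih]

theorem pv_sorted_map {α β : Type} {κ : Type} [LinearOrder κ] (g : α → β) (key : β → κ)
    (r : List α) (rev : Bool) :
    PySem.List.sorted (r.map g) key rev = (PySem.List.sorted r (fun x => key (g x)) rev).map g := by
  cases rev with
  | false =>
    rw [PySem.List.sorted_eq_foldl_insertBy, PySem.List.sorted_eq_foldl_insertBy]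
    exact pv_foldl_insertBy_map g _ _ (fun a b => rfl) r []
  | true =>
    rw [PySem.List.sorted_rev_eq_foldl_insertBy, PySem.List.sorted_rev_eq_foldl_insertBy]
    exact pv_foldl_insertBy_map g _ _ (fun a b => rfl) r []

theorem pv_pvProc_nil : pvProc [] = [] := by
  simp [pvProc, pvRuns]

theorem pv_pvProc_cons (x : String × String) (xs : List (String × String)) :
    pvProc (x :: xs)
      = PySem.List.sorted (x :: xs.takeWhile (fun y => y.2 == x.2)) (fun el => el.1) true
        ++ pvProc (xs.dropWhile (fun y => y.2 == x.2)) := by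
  rw [pvProc, pvRuns]
  simp [pvProc]

theorem pv_tag_flatMap_sorted (f : List (String × String)) (j0 : Int) :
    ((pvIota j0 (pvRuns f).length).flatMap
        (fun j => PySem.List.sorted ((pvTag j0 f).filter (fun p => p.2 == j))
          (fun p => p.1.1) true)).map (fun p => p.1)
      = pvProc f := by
  induction j0, f using pvTag.induct with
  | case1 j => simp [pvRuns, pvIota, pvProc, pvTag]
  | case2 j x xs ih =>
    have hrn : (pvRuns (x :: xs)).length
        = (pvRuns (xs.dropWhile (fun y => y.2 == x.2))).length + 1 := by
      rw [pvRuns]; simp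
    rw [hrn]
    have hio : pvIota j ((pvRuns (xs.dropWhile (fun y => y.2 == x.2))).length + 1)
        = j :: pvIota (j + 1) (pvRuns (xs.dropWhile (fun y => y.2 == x.2))).length := rfl
    rw [hio, List.flatMap_cons, List.map_append]
    have htag : pvTag j (x :: xs)
        = ((x :: xs.takeWhile (fun y => y.2 == x.2)).map (fun el => (el, j)))
          ++ pvTag (j + 1) (xs.dropWhile (fun y => y.2 == x.2)) := by
      rw [pvTag]
    have hfil0 : (pvTag j (x :: xs)).filter (fun p => p.2 == j)
        = (x :: xs.takeWhile (fun y => y.2 == x.2)).map (fun el => (el, j)) := by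
      rw [htag, List.filter_append]
      have h1 : ((x :: xs.takeWhile (fun y => y.2 == x.2)).map (fun el => (el, j))).filter
          (fun p => p.2 == j) = (x :: xs.takeWhile (fun y => y.2 == x.2)).map (fun el => (el, j)) := by
        apply List.filter_eq_self.mpr
        intro a ha
        rcases List.mem_map.mp ha with ⟨el, _, rfl⟩
        simp
      have h2 : (pvTag (j + 1) (xs.dropWhile (fun y => y.2 == x.2))).filter
          (fun p => p.2 == j) = [] := by
        apply List.filter_eq_nil_iff.mpr
        intro a ha
        have := pv_tag_bounds _ _ a ha
        simp
        omega
      rw [h1, h2, List.append_nil]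
    have hcong : (pvIota (j + 1) (pvRuns (xs.dropWhile (fun y => y.2 == x.2))).length).flatMap
          (fun j' => PySem.List.sorted ((pvTag j (x :: xs)).filter (fun p => p.2 == j'))
            (fun p => p.1.1) true)
        = (pvIota (j + 1) (pvRuns (xs.dropWhile (fun y => y.2 == x.2))).length).flatMap
          (fun j' => PySem.List.sorted
            ((pvTag (j + 1) (xs.dropWhile (fun y => y.2 == x.2))).filter (fun p => p.2 == j'))
            (fun p => p.1.1) true) := by
      apply List.flatMap_congr
      intro j' hj'
      have hgt : j < j' := by
        have := (pv_mem_iota _ _ _).mp hj'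
        omega
      have h1 : ((x :: xs.takeWhile (fun y => y.2 == x.2)).map (fun el => (el, j))).filter
          (fun p => p.2 == j') = [] := by
        apply List.filter_eq_nil_iff.mpr
        intro a ha
        rcases List.mem_map.mp ha with ⟨el, _, rfl⟩
        simp
        omega
      rw [htag, List.filter_append, h1, List.nil_append]
    rw [hfil0, hcong, ih]
    rw [pv_sorted_map (fun el => (el, j)) (fun p => p.1.1) (x :: xs.takeWhile (fun y => y.2 == x.2)) true]
    rw [List.map_map, pv_pvProc_cons]
    simp [Function.comp_def]

theorem pv_alt_eq (f : List (String × String)) :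
    additional_sort_alt f = PySem.Str.join "" ((pvProc f).map (fun el => el.1)) := by
  simp only [additional_sort_alt, bRids]
  rw [pv_bRids_foldl f [] 0 none]
  simp only [Option.map_none, List.nil_append]
  rw [pv_zip_rids]
  have hmem : ∀ p ∈ PySem.List.sorted (pvTag 0 f) (fun p => p.1.1) true,
      p.2 ∈ pvIota 0 (pvRuns f).length := by
    intro p hp
    have hmem' := (PySem.List.mem_sorted (pvTag 0 f) (fun p => p.1.1) true p).mp hp
    have hb := pv_tag_bounds f 0 p hmem'
    apply (pv_mem_iota _ _ _).mpr
    omega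
  rw [pv_sorted_groups (PySem.List.sorted (pvTag 0 f) (fun p => p.1.1) true)
    (pvIota 0 (pvRuns f).length) (pv_iota_pairwise 0 _) hmem]
  have hfil : ∀ j ∈ pvIota 0 (pvRuns f).length,
      (PySem.List.sorted (pvTag 0 f) (fun p => p.1.1) true).filter (fun p => p.2 == j)
        = PySem.List.sorted ((pvTag 0 f).filter (fun p => p.2 == j)) (fun p => p.1.1) true :=
    fun j _ => pv_filter_sorted_rev (fun p => p.1.1) (fun p => p.2 == j) (pvTag 0 f)
  rw [List.flatMap_congr hfil]
  rw [pv_tag_flatMap_sorted f 0]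

-- ---------- A-side lemmas ----------

theorem pv_inner_run (r : List (String × String)) (pre rest : List (String × String))
    (c : String) (fuel : Nat)
    (hr : r ≠ [])
    (hall : ∀ y ∈ r, y.2 = c)
    (hb : ∀ z, rest.head? = some z → z.2 ≠ c)
    (hf : r.length ≤ fuel + 1) :
    asInner (pre ++ r ++ rest) (pre.length : Int) (pre.length : Int) fuel
      = ((pre.length : Int) + r.length - 1, (pre.length : Int) + r.length - 1) := by
  induction r generalizing pre fuel with
  | nil => exact absurd rfl hr
  | cons y r' ih =>
    have hyc : y.2 = c := hall y (by simp)
    cases r' with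
    | nil =>
      -- run of length 1: the loop condition is false, whatever the fuel
      have hres : asInner (pre ++ [y] ++ rest) (pre.length : Int) (pre.length : Int) fuel
          = ((pre.length : Int), (pre.length : Int)) := by
        cases fuel with
        | zero => rfl
        | succ fuel =>
          rw [asInner]
          rw [if_neg]
          intro ⟨h1, h2⟩
          cases rest with
          | nil => simp [PySem.List.len] at h1
          | cons z rest' =>
            have hz : z.2 ≠ c := hb z rfl
            have hget1 : PySem.List.pyGet? (pre ++ [y] ++ z :: rest') (pre.length : Int)
                = some y := by
              have : pre ++ [y] ++ z :: rest' = pre ++ y :: (z :: rest') := by simp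
              rw [this]
              exact PySem.List.pyGet?_append_length pre _ y
            have hget2 : PySem.List.pyGet? (pre ++ [y] ++ z :: rest') ((pre.length : Int) + 1)
                = some z := by
              have h1 : ((pre.length : Int) + 1) = ((pre ++ [y]).length : Int) := by
                simp
              rw [h1]
              have : pre ++ [y] ++ z :: rest' = (pre ++ [y]) ++ z :: rest' := by simp
              rw [this]
              exact PySem.List.pyGet?_append_length (pre ++ [y]) _ z
            rw [PySem.List.pyGetD, PySem.List.pyGetD, hget1, hget2] at h2
            simp at h2
            exact hz (h2.symm.trans hyc)
      rw [hres]
      simp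
    | cons z r'' =>
      have hzc : z.2 = c := hall z (by simp)
      obtain ⟨fuel', rfl⟩ : ∃ fuel', fuel = fuel' + 1 := by
        cases fuel with
        | zero => simp at hf
        | succ n => exact ⟨n, rfl⟩
      rw [asInner, if_pos]
      · have hstep : ((pre.length : Int) + 1) = (((pre ++ [y]).length : Nat) : Int) := by simp
        have hre : pre ++ (y :: z :: r'') ++ rest = (pre ++ [y]) ++ (z :: r'') ++ rest := by simp
        rw [hstep, hre]
        rw [ih (pre ++ [y]) fuel' (by simp) (fun w hw => hall w (by simp [hw]))
          (by simp at hf ⊢; omega)]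
        simp only [Prod.mk.injEq, List.length_append, List.length_cons, List.length_nil]
        push_cast
        omega
      · constructor
        · simp [PySem.List.len]
          omega
        · have hget1 : PySem.List.pyGet? (pre ++ (y :: z :: r'') ++ rest) (pre.length : Int)
              = some y := by
            have : pre ++ (y :: z :: r'') ++ rest = pre ++ y :: (z :: r'' ++ rest) := by simp
            rw [this]
            exact PySem.List.pyGet?_append_length pre _ y
          have hget2 : PySem.List.pyGet? (pre ++ (y :: z :: r'') ++ rest)
              ((pre.length : Int) + 1) = some z := by
            have h1 : ((pre.length : Int) + 1) = ((pre ++ [y]).length : Int) := by simp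
            rw [h1]
            have : pre ++ (y :: z :: r'') ++ rest = (pre ++ [y]) ++ z :: (r'' ++ rest) := by
              simp
            rw [this]
            exact PySem.List.pyGet?_append_length (pre ++ [y]) _ z
          rw [PySem.List.pyGetD, PySem.List.pyGetD, hget1, hget2]
          simp [hyc, hzc]

theorem pv_write (old repl pre rest : List (String × String)) (d : String × String)
    (hlen : old.length = repl.length) :
    (PySem.List.pyRange (pre.length : Int) ((pre.length : Int) + (old.length : Int))).foldl
        (fun acc ind =>
          PySem.List.pySetD acc ind (PySem.List.pyGetD repl (ind - (pre.length : Int)) d))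
        (pre ++ old ++ rest)
      = pre ++ repl ++ rest := by
  induction old generalizing repl pre with
  | nil =>
    have hrepl : repl = [] := List.length_eq_zero_iff.mp hlen.symm
    subst hrepl
    have hnil : PySem.List.pyRange (pre.length : Int)
        ((pre.length : Int) + (([] : List (String × String)).length : Int)) = [] := by
      apply List.eq_nil_iff_forall_not_mem.mpr
      intro x hx
      have := PySem.List.mem_pyRange_one.mp hx
      simp at this
      omega
    rw [hnil]
    simp
  | cons o old' ih =>
    obtain ⟨rp, repl', rfl⟩ : ∃ rp repl', repl = rp :: repl' := by
      cases repl with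
      | nil => simp at hlen
      | cons a b => exact ⟨a, b, rfl⟩
    have hlt : (pre.length : Int) < (pre.length : Int) + ((o :: old').length : Int) := by
      simp only [List.length_cons]
      push_cast
      omega
    rw [PySem.List.pyRange_one_cons hlt, List.foldl_cons]
    have hset : PySem.List.pySetD (pre ++ (o :: old') ++ rest) (pre.length : Int)
        (PySem.List.pyGetD (rp :: repl') ((pre.length : Int) - (pre.length : Int)) d)
        = (pre ++ [rp]) ++ old' ++ rest := by
      have h0 : (pre.length : Int) - (pre.length : Int) = 0 := by omega
      rw [h0, PySem.List.pyGetD_zero_cons]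
      have h1 : pre ++ (o :: old') ++ rest = pre ++ o :: (old' ++ rest) := by simp
      rw [h1]
      simp [PySem.List.pySetD, PySem.List.pySet?, PySem.List.pyIdx?]
      rw [if_pos (by positivity)]
      rfl
    rw [hset]
    have hrange : (pre.length : Int) + 1 = ((pre ++ [rp]).length : Int) := by simp
    have hend : (pre.length : Int) + ((o :: old').length : Int)
        = ((pre ++ [rp]).length : Int) + (old'.length : Int) := by
      simp only [List.length_cons, List.length_append, List.length_nil]
      push_cast
      omega
    rw [hrange, hend]
    rw [PySem.List.foldl_congr_mem _ _
      (fun acc ind => PySem.List.pySetD acc ind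
        (PySem.List.pyGetD repl' (ind - (((pre ++ [rp]).length : Nat) : Int)) d)) _ ?_]
    · have h2 : pre ++ rp :: repl' ++ rest = (pre ++ [rp]) ++ repl' ++ rest := by simp
      rw [h2]
      exact ih repl' (pre ++ [rp]) (by simp at hlen ⊢; omega)
    · intro acc ind hind
      beta_reduce
      have hmem := PySem.List.mem_pyRange_one.mp hind
      have hge : ((pre ++ [rp]).length : Int) ≤ ind := hmem.1
      have hlen1 : ((pre ++ [rp]).length : Int) = (pre.length : Int) + 1 := by simp
      obtain ⟨n, hn⟩ : ∃ n : Nat, (n : Int) = ind - (pre.length : Int) - 1 :=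
        ⟨(ind - (pre.length : Int) - 1).toNat, Int.toNat_of_nonneg (by omega)⟩
      have h1 : ind - (pre.length : Int) = (n : Int) + 1 := by omega
      have h2 : ind - ((pre ++ [rp]).length : Int) = (n : Int) := by omega
      rw [h1, h2, PySem.List.pyGetD, PySem.List.pyGetD, PySem.List.pyGet?_cons_succ]

theorem pv_outer (fuel : Nat) : ∀ (rest pre : List (String × String)),
    rest.length ≤ fuel →
    asOuter (pre ++ rest) (pre.length : Int) fuel = pre ++ pvProc rest := by
  induction fuel with
  | zero =>
    intro rest pre hle
    have hnil : rest = [] := List.length_eq_zero_iff.mp (Nat.le_zero.mp hle)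
    subst hnil
    simp [asOuter, pv_pvProc_nil]
  | succ fuel ih =>
    intro rest pre hle
    cases rest with
    | nil =>
      rw [asOuter, if_neg (by simp [PySem.List.len])]
      simp [pv_pvProc_nil]
    | cons x xs =>
      by_cases hxs : xs = []
      · subst hxs
        rw [asOuter, if_neg (by simp [PySem.List.len])]
        rw [pv_pvProc_cons]
        simp [pvProc, pvRuns]
        rfl
      · have hsplit : (xs.takeWhile (fun y => y.2 == x.2)) ++ (xs.dropWhile (fun y => y.2 == x.2)) = xs := List.takeWhile_append_dropWhile
        have htd := congrArg List.length hsplit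
        simp only [List.length_append] at htd
        have hf : pre ++ x :: xs = pre ++ (x :: xs.takeWhile (fun y => y.2 == x.2)) ++ (xs.dropWhile (fun y => y.2 == x.2)) := by
          rw [List.append_assoc]
          simp [hsplit]
        have hxlen : 0 < xs.length := List.length_pos_iff.mpr hxs
        have hall : ∀ y ∈ (x :: xs.takeWhile (fun y => y.2 == x.2)), y.2 = x.2 := by
          intro y hy
          rcases List.mem_cons.mp hy with h | h
          · rw [h]
          · simpa using List.mem_takeWhile_imp h
        have hb : ∀ z, (xs.dropWhile (fun y => y.2 == x.2)).head? = some z → z.2 ≠ x.2 := by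
          intro z hz
          have := List.head?_dropWhile_not (fun y => y.2 == x.2) xs
          rw [hz] at this
          simpa using this
        have hinner := pv_inner_run (x :: xs.takeWhile (fun y => y.2 == x.2)) pre (xs.dropWhile (fun y => y.2 == x.2)) x.2 (pre ++ (x :: xs.takeWhile (fun y => y.2 == x.2)) ++ (xs.dropWhile (fun y => y.2 == x.2))).length
          (by simp) hall hb (by simp [List.length_append]; omega)
        rw [asOuter, hf, if_pos (by simp [PySem.List.len]; omega)]
        dsimp only
        rw [hinner]
        dsimp only
        by_cases ht : (xs.takeWhile (fun y => y.2 == x.2)) = []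
        · -- run of length 1
          rw [if_neg (by simp [ht])]
          have hdr : (xs.dropWhile (fun y => y.2 == x.2)) = xs := by
            rw [ht] at hsplit
            simpa using hsplit
          have hi1 : ((pre.length : Int) + ((x :: xs.takeWhile (fun y => y.2 == x.2)).length : Int) - 1 + 1)
              = (((pre ++ [x]).length : Nat) : Int) := by
            rw [ht]
            try simp
            try omega
          have hf2 : pre ++ (x :: xs.takeWhile (fun y => y.2 == x.2)) ++ (xs.dropWhile (fun y => y.2 == x.2)) = (pre ++ [x]) ++ xs := by
            rw [ht, hdr]
            try simp
          rw [hi1, hf2, ih xs (pre ++ [x]) (by simp at hle; omega)]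
          rw [pv_pvProc_cons, ht]
          have hs1 : PySem.List.sorted [x] (fun el => el.1) true = [x] := rfl
          rw [hs1, hdr]
          simp
        · -- run of length ≥ 2
          have htpos : 0 < (xs.takeWhile (fun y => y.2 == x.2)).length := List.length_pos_iff.mpr ht
          rw [if_pos (by simp; omega)]
          have hidx : ((pre.length : Int) + ((x :: xs.takeWhile (fun y => y.2 == x.2)).length : Int) - 1 + 1)
              = ((pre.length + (x :: xs.takeWhile (fun y => y.2 == x.2)).length : Nat) : Int) := by
            push_cast
            ring
          have hslice : PySem.List.slice (pre ++ (x :: xs.takeWhile (fun y => y.2 == x.2)) ++ (xs.dropWhile (fun y => y.2 == x.2))) (some (pre.length : Int))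
              (some ((pre.length : Int) + ((x :: xs.takeWhile (fun y => y.2 == x.2)).length : Int) - 1 + 1)) = (x :: xs.takeWhile (fun y => y.2 == x.2)) := by
            rw [hidx, PySem.List.slice_natCast]
            have h1 : pre.length + (x :: xs.takeWhile (fun y => y.2 == x.2)).length - pre.length = (x :: xs.takeWhile (fun y => y.2 == x.2)).length := by omega
            have h2 : pre ++ (x :: xs.takeWhile (fun y => y.2 == x.2)) ++ (xs.dropWhile (fun y => y.2 == x.2)) = pre ++ ((x :: xs.takeWhile (fun y => y.2 == x.2)) ++ (xs.dropWhile (fun y => y.2 == x.2))) := by simp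
            rw [h1, h2, List.drop_left, List.take_left]
          rw [hslice]
          rw [if_pos (by simp [PySem.List.len]; omega)]
          have hwr := pv_write (x :: xs.takeWhile (fun y => y.2 == x.2)) (PySem.List.sorted (x :: xs.takeWhile (fun y => y.2 == x.2)) (fun el => el.1) true) pre (xs.dropWhile (fun y => y.2 == x.2))
            ("", "") (PySem.List.length_sorted (x :: xs.takeWhile (fun y => y.2 == x.2)) (fun el => el.1) true).symm
          have hend : ((pre.length : Int) + ((x :: xs.takeWhile (fun y => y.2 == x.2)).length : Int) - 1 + 1)
              = (pre.length : Int) + ((x :: xs.takeWhile (fun y => y.2 == x.2)).length : Int) := by ring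
          rw [hend, hwr]
          have hi2 : ((pre.length : Int) + ((x :: xs.takeWhile (fun y => y.2 == x.2)).length : Int))
              = (((pre ++ PySem.List.sorted (x :: xs.takeWhile (fun y => y.2 == x.2)) (fun el => el.1) true).length : Nat) : Int) := by
            rw [List.length_append, PySem.List.length_sorted]
            push_cast
            ring
          rw [hi2, ih (xs.dropWhile (fun y => y.2 == x.2)) (pre ++ PySem.List.sorted (x :: xs.takeWhile (fun y => y.2 == x.2)) (fun el => el.1) true)
            (by simp only [List.length_cons] at hle; omega)]
          rw [pv_pvProc_cons]
          simp

theorem pv_a_eq (f : List (String × String)) :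
    additional_sort f = PySem.Str.join "" ((pvProc f).map (fun el => el.1)) := by
  have h := pv_outer f.length f [] (le_refl _)
  simp only [List.nil_append, List.length_nil, Nat.cast_zero] at h
  simp only [additional_sort]
  rw [h]

-- ===== VERDICT (by name: the statement is the Claim_ definition above) =====
theorem additional_sort_spec : Claim_equal_additional_sort := by
  intro f _
  unfold Spec_additional_sort
  rw [pv_a_eq, pv_alt_eq]
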